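-- pv_equiv track=rewrite | github.com/ckoons/BubbleSpacetimeTheory | play/toy_406_kempe_interference.py | compute_tau
-- ===== SOURCE A (Python) =====
-- from collections import defaultdict, deque
-- from itertools import combinations
--
-- def kempe_chain(adj, color, start, c1, c2, exclude=-1):
--     """BFS (c1,c2)-Kempe chain containing start, excluding one vertex."""
--     chain = set()
--     queue = deque([start])
--     while queue:
--         v = queue.popleft()
--         if v in chain or v == exclude:
--             continue
--         if color.get(v, -1) not in (c1, c2):
--             continue
--         chain.add(v)
--         for u in adj.get(v, set()):
--             if u != exclude and u not in chain and color.get(u, -1) in (c1, c2):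
--                 queue.append(u)
--     return chain
--
-- def compute_tau(adj, color, v):
--     """τ(v) = number of tangled color pairs at vertex v.
--     Tangled (c1,c2): ALL of v's neighbors colored c1 or c2
--     lie in the SAME (c1,c2)-Kempe chain in G-v."""
--     neighbors = list(adj.get(v, set()))
--     by_color = defaultdict(list)
--     for u in neighbors:
--         by_color[color[u]].append(u)
--
--     tangled = 0
--     tangled_pairs = []
--     for c1, c2 in combinations(range(4), 2):
--         relevant = by_color.get(c1, []) + by_color.get(c2, [])
--         if len(relevant) < 2:
--             continue
--         first = relevant[0]
--         chain = kempe_chain(adj, color, first, c1, c2, exclude=v)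
--         if all(u in chain for u in relevant):
--             tangled += 1
--             tangled_pairs.append((c1, c2))
--     return tangled, tangled_pairs
-- ===== SOURCE B (Python) =====
-- from itertools import combinations
--
-- def compute_tau(adj, color, v):
--     """Per color pair, a Floyd-Warshall style transitive closure of the
--     (c1,c2)-coloured subgraph of G-v replaces A's per-source BFS: reach[i]
--     is grown over each intermediate vertex k, then the tangle test reads
--     reach[first] directly."""
--     neighbors = list(adj.get(v, []))
--     by_color = {}
--     for u in neighbors:
--         by_color.setdefault(color[u], []).append(u)
--
--     tangled = 0
--     tangled_pairs = []
--     for c1, c2 in combinations(range(4), 2):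
--         relevant = by_color.get(c1, []) + by_color.get(c2, [])
--         if len(relevant) < 2:
--             continue
--         first = relevant[0]
--
--         def qual(x):
--             return x != v and color.get(x, -1) in (c1, c2)
--
--         nodes = []
--         seen = set()
--         for x in [first] + [w for ns in adj.values() for w in ns]:
--             if x not in seen and qual(x):
--                 seen.add(x)
--                 nodes.append(x)
--         reach = {u: {w for w in adj.get(u, []) if qual(w)} for u in nodes}
--         for k in nodes:
--             for i in nodes:
--                 if k in reach[i]:
--                     reach[i] |= reach[k]
--         if qual(first) and all(u == first or u in reach[first] for u in relevant):
--             tangled += 1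
--             tangled_pairs.append((c1, c2))
--     return tangled, tangled_pairs
-- ===== Notes on version B (the rewrite author's own statement) =====
-- stated objective: alternative
-- what changed: A's per-pair BFS Kempe-chain (deque + visited set grown from one start vertex) is replaced by a Floyd-Warshall style dynamic program: per colour pair B builds the qualified node list and a direct-successor set per node, closes it transitively over each intermediate vertex k with 'if k in reach[i]: reach[i] |= reach[k]', and reads the tangle test off reach[first].
import Mathlib
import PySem

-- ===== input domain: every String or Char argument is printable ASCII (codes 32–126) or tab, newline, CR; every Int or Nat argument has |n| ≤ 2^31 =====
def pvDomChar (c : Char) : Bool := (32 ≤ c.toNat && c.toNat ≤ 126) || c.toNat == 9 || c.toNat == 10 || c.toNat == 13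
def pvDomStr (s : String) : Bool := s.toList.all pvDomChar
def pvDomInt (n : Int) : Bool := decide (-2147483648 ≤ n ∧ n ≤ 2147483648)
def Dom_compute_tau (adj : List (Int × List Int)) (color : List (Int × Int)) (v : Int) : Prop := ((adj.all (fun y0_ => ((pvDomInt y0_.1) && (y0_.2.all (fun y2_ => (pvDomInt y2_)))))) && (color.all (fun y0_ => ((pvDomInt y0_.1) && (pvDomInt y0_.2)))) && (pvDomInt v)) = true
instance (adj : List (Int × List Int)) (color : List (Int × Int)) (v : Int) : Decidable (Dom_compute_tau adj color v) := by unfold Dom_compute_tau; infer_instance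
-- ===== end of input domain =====

-- B replaces A's per-pair BFS Kempe-chain search by a Floyd–Warshall style
-- transitive closure of the (c1,c2)-coloured subgraph of G-v (objective: alternative).

-- ===== PORT A =====
-- termination helpers for the BFS loop (the port cites them in its proofs)
theorem pv_getD_mem_values_flatten (d : PySem.Dict Int (List Int)) (u w : Int)
    (hw : w ∈ d.getD u []) : w ∈ d.values.flatten := by
  rw [PySem.Dict.getD_eq_get?_getD] at hw
  cases h : d.get? u with
  | none => rw [h] at hw; simp at hw
  | some l =>
    rw [h] at hw
    have hi := PySem.Dict.mem_items_of_get?_eq_some d h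
    have hv : l ∈ d.values := by
      simp only [PySem.Dict.values, List.mem_map]
      exact ⟨(u, l), hi, rfl⟩
    exact List.mem_flatten.mpr ⟨l, hv, hw⟩

theorem pv_filter_lt (univ chain chain' : List Int) (x : Int)
    (hx : x ∈ univ) (hxc : x ∉ chain) (hxc' : x ∈ chain')
    (hsub : ∀ y, y ∈ chain → y ∈ chain') :
    (univ.filter (fun y => !chain'.contains y)).length <
      (univ.filter (fun y => !chain.contains y)).length := by
  induction univ with
  | nil => simp at hx
  | cons a t ih =>
    rcases List.mem_cons.mp hx with rfl | hat
    · simp only [List.filter_cons]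
      have h1 : (!chain'.contains x) = false := by simp [hxc']
      have h2 : (!chain.contains x) = true := by simp [hxc]
      rw [h1, h2]
      have hle : (t.filter (fun y => !chain'.contains y)).length ≤
          (t.filter (fun y => !chain.contains y)).length := by
        apply List.Sublist.length_le
        apply List.monotone_filter_right
        intro y hy
        simp only [Bool.not_eq_eq_eq_not, Bool.not_true, List.contains_eq_mem,
          decide_eq_false_iff_not] at hy ⊢
        exact fun hc => hy (hsub y hc)
      simpa using Nat.lt_succ_of_le hle
    · simp only [List.filter_cons]
      by_cases hac' : a ∈ chain'
      · have h1 : (!chain'.contains a) = false := by simp [hac']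
        rw [h1]
        by_cases hac : a ∈ chain
        · have h2 : (!chain.contains a) = false := by simp [hac]
          rw [h2]; exact ih hat
        · have h2 : (!chain.contains a) = true := by simp [hac]
          rw [h2]; exact Nat.lt_succ_of_lt (ih hat)
      · have hac : a ∉ chain := fun hc => hac' (hsub a hc)
        have h1 : (!chain'.contains a) = true := by simp [hac']
        have h2 : (!chain.contains a) = true := by simp [hac]
        rw [h1, h2]; simpa using ih hat

-- literal port of kempe_chain's while-queue loop (chain, queue are the Python state;
-- univ/ha/hq only certify termination)
def pvKempeAux (adjD : PySem.Dict Int (List Int)) (colorD : PySem.Dict Int Int)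
    (c1 c2 exclude : Int) (univ : List Int)
    (ha : ∀ x ∈ adjD.values.flatten, x ∈ univ)
    (chain : PySem.Set Int) (queue : List Int)
    (hq : ∀ x ∈ queue, x ∈ univ) : PySem.Set Int :=
  match queue with
  | [] => chain
  | x :: rest =>
    if hx1 : x ∈ chain ∨ x = exclude then
      pvKempeAux adjD colorD c1 c2 exclude univ ha chain rest
        (fun y hy => hq y (List.mem_cons_of_mem _ hy))
    else if hx2 : ¬(colorD.getD x (-1) = c1 ∨ colorD.getD x (-1) = c2) then
      pvKempeAux adjD colorD c1 c2 exclude univ ha chain rest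
        (fun y hy => hq y (List.mem_cons_of_mem _ hy))
    else
      pvKempeAux adjD colorD c1 c2 exclude univ ha (chain.add x)
        (rest ++ (adjD.getD x []).filter
          (fun u => u != exclude && !((chain.add x).contains u) &&
            (colorD.getD u (-1) == c1 || colorD.getD u (-1) == c2)))
        (fun y hy => by
          rcases List.mem_append.mp hy with h | h
          · exact hq y (List.mem_cons_of_mem _ h)
          · exact ha y (pv_getD_mem_values_flatten adjD x y (List.mem_of_mem_filter h)))
  termination_by ((univ.filter (fun y => !chain.contains y)).length, queue.length)
  decreasing_by
  · exact Prod.Lex.right _ (Nat.lt_succ_self _)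
  · exact Prod.Lex.right _ (Nat.lt_succ_self _)
  · apply Prod.Lex.left
    exact pv_filter_lt univ chain (chain.add x) x (hq x List.mem_cons_self)
      (fun h => hx1 (Or.inl h)) (by simp [PySem.Set.mem_add])
      (fun y hy => by simp [PySem.Set.mem_add, hy])

def pvKempe (adjD : PySem.Dict Int (List Int)) (colorD : PySem.Dict Int Int)
    (start c1 c2 exclude : Int) : PySem.Set Int :=
  pvKempeAux adjD colorD c1 c2 exclude (start :: adjD.values.flatten)
    (fun x hx => List.mem_cons_of_mem _ hx) PySem.Set.empty [start]
    (fun y hy => by simp at hy; simp [hy])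

def compute_tau (adj : List (Int × List Int)) (color : List (Int × Int)) (v : Int) :
    Int × (List (Int × Int)) :=
  let adjD := PySem.Dict.ofList adj
  let colorD := PySem.Dict.ofList color
  let neighbors := adjD.getD v []
  let byColor := neighbors.foldl
    (fun d u => d.modify (colorD.getD u (-1)) [] (· ++ [u])) PySem.Dict.empty
  (PySem.List.combinations (PySem.List.pyRange 0 4 1) 2).foldl
    (fun acc pr =>
      match pr with
      | [c1, c2] =>
        let relevant := byColor.getD c1 [] ++ byColor.getD c2 []
        if relevant.length < 2 then acc
        else
          let chain := pvKempe adjD colorD (PySem.List.pyGetD relevant 0 0) c1 c2 v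
          if relevant.all (fun u => PySem.Set.contains chain u) then
            (acc.1 + 1, acc.2 ++ [(c1, c2)])
          else acc
      | _ => acc) (0, [])

-- ===== PORT B =====
-- Source B's qual(x) predicate
def pvQualB (colorD : PySem.Dict Int Int) (c1 c2 v x : Int) : Bool :=
  x != v && (colorD.getD x (-1) == c1 || colorD.getD x (-1) == c2)

-- Source B's nodes loop: first occurrences of the qualified candidates, in order
def pvNodes (adjD : PySem.Dict Int (List Int)) (colorD : PySem.Dict Int Int)
    (c1 c2 v first : Int) : List Int :=
  PySem.Set.ofList ((first :: adjD.values.flatten).filter (pvQualB colorD c1 c2 v))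

-- Source B's dict comprehension: reach[u] = {w for w in adj.get(u,[]) if qual(w)}
def pvReach0 (adjD : PySem.Dict Int (List Int)) (colorD : PySem.Dict Int Int)
    (c1 c2 v first : Int) : PySem.Dict Int (PySem.Set Int) :=
  (pvNodes adjD colorD c1 c2 v first).foldl
    (fun d u => d.insert u (PySem.Set.ofList ((adjD.getD u []).filter (pvQualB colorD c1 c2 v))))
    PySem.Dict.empty

-- the inner body 'if k in reach[i]: reach[i] |= reach[k]' (reach[i]/reach[k] always
-- keyed when i,k ∈ nodes, so getD with the empty-set default is exact there)
def pvRoundStep (k : Int) (r : PySem.Dict Int (PySem.Set Int)) (i : Int) :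
    PySem.Dict Int (PySem.Set Int) :=
  if (r.getD i PySem.Set.empty).contains k then
    r.insert i (PySem.Set.union (r.getD i PySem.Set.empty) (r.getD k PySem.Set.empty))
  else r

-- 'for i in nodes: …' for one intermediate k
def pvRound (nodes : List Int) (r : PySem.Dict Int (PySem.Set Int)) (k : Int) :
    PySem.Dict Int (PySem.Set Int) :=
  nodes.foldl (pvRoundStep k) r

-- 'for k in nodes: for i in nodes: …'
def pvReachF (adjD : PySem.Dict Int (List Int)) (colorD : PySem.Dict Int Int)
    (c1 c2 v first : Int) : PySem.Dict Int (PySem.Set Int) :=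
  (pvNodes adjD colorD c1 c2 v first).foldl
    (pvRound (pvNodes adjD colorD c1 c2 v first))
    (pvReach0 adjD colorD c1 c2 v first)

def compute_tau_alt (adj : List (Int × List Int)) (color : List (Int × Int)) (v : Int) :
    Int × (List (Int × Int)) :=
  let adjD := PySem.Dict.ofList adj
  let colorD := PySem.Dict.ofList color
  let neighbors := adjD.getD v []
  let byColor := neighbors.foldl
    (fun d u => d.modify (colorD.getD u (-1)) [] (· ++ [u])) PySem.Dict.empty
  (PySem.List.combinations (PySem.List.pyRange 0 4 1) 2).foldl
    (fun acc pr =>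
      -- tuple unpacking 'for c1, c2 in …': every element of combinations(range(4), 2) has length 2
      let c1 := PySem.List.pyGetD pr 0 0
      let c2 := PySem.List.pyGetD pr 1 0
      let relevant := byColor.getD c1 [] ++ byColor.getD c2 []
      if relevant.length < 2 then acc
      else
        let first := PySem.List.pyGetD relevant 0 0
        let reach := pvReachF adjD colorD c1 c2 v first
        if pvQualB colorD c1 c2 v first &&
            relevant.all (fun u =>
              u == first || (reach.getD first PySem.Set.empty).contains u) then
          (acc.1 + 1, acc.2 ++ [(c1, c2)])
        else acc) (0, [])

-- ===== PRECONDITION & SPEC =====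
-- last-match lookup = the value the Python dict built from adj holds at v
def pvNeighborsOf (adj : List (Int × List Int)) (v : Int) : List Int :=
  ((adj.reverse.find? (fun q => q.1 == v)).map Prod.snd).getD []

-- Pre_ excludes exactly the inputs where A raises KeyError: a neighbor of v with no color entry.
def Pre_compute_tau (adj : List (Int × List Int)) (color : List (Int × Int)) (v : Int) : Prop :=
  ∀ u ∈ pvNeighborsOf adj v, ∃ q ∈ color, q.1 = u
instance (adj : List (Int × List Int)) (color : List (Int × Int)) (v : Int) :
    Decidable (Pre_compute_tau adj color v) := by unfold Pre_compute_tau; infer_instance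

def pvWitness_compute_tau : (List (Int × List Int)) × (List (Int × Int)) × Int :=
  ([(0, [1, 2]), (1, [2]), (2, [1])], [(0, 0), (1, 0), (2, 1)], 0)

def Spec_compute_tau (adj : List (Int × List Int)) (color : List (Int × Int)) (v : Int)
    (out : Int × (List (Int × Int))) : Prop := out = compute_tau_alt adj color v
instance (adj : List (Int × List Int)) (color : List (Int × Int)) (v : Int)
    (out : Int × (List (Int × Int))) : Decidable (Spec_compute_tau adj color v out) := by
  unfold Spec_compute_tau; infer_instance

-- ===== CLAIM (what is proved, stated in full; the proofs are below) =====
def Claim_equal_compute_tau : Prop := ∀ (adj : List (Int × List Int)) (color : List (Int × Int)) (v : Int), Dom_compute_tau adj color v → Pre_compute_tau adj color v → Spec_compute_tau adj color v (compute_tau adj color v)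

-- ===== LEMMAS AND PROOFS =====
-- the common specification: reachability from start inside the (c1,c2)-coloured
-- subgraph of G - exclude
def pvQual (colorD : PySem.Dict Int Int) (c1 c2 ex x : Int) : Prop :=
  x ≠ ex ∧ (colorD.getD x (-1) = c1 ∨ colorD.getD x (-1) = c2)

def pvStep (adjD : PySem.Dict Int (List Int)) (colorD : PySem.Dict Int Int)
    (c1 c2 ex a b : Int) : Prop :=
  b ∈ adjD.getD a [] ∧ pvQual colorD c1 c2 ex b

def pvReach (adjD : PySem.Dict Int (List Int)) (colorD : PySem.Dict Int Int)
    (c1 c2 ex start x : Int) : Prop :=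
  pvQual colorD c1 c2 ex start ∧
    Relation.ReflTransGen (pvStep adjD colorD c1 c2 ex) start x

theorem kempe_mono (adjD : PySem.Dict Int (List Int)) (colorD : PySem.Dict Int Int)
    (c1 c2 ex : Int) (univ : List Int) (ha : ∀ x ∈ adjD.values.flatten, x ∈ univ)
    (chain : PySem.Set Int) (queue : List Int) (hq : ∀ x ∈ queue, x ∈ univ) :
    ∀ y ∈ chain, y ∈ pvKempeAux adjD colorD c1 c2 ex univ ha chain queue hq := by
  fun_induction pvKempeAux with
  | case1 => exact fun y hy => hy
  | case2 _ _ _ _ _ _ ih => exact ih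
  | case3 _ _ _ _ _ _ _ ih => exact ih
  | case4 _ _ _ _ _ _ _ ih =>
    intro y hy
    exact ih y (by simp [PySem.Set.mem_add, hy])

theorem kempe_queue (adjD : PySem.Dict Int (List Int)) (colorD : PySem.Dict Int Int)
    (c1 c2 ex : Int) (univ : List Int) (ha : ∀ x ∈ adjD.values.flatten, x ∈ univ)
    (chain : PySem.Set Int) (queue : List Int) (hq : ∀ x ∈ queue, x ∈ univ) :
    ∀ y ∈ queue, pvQual colorD c1 c2 ex y →
      y ∈ pvKempeAux adjD colorD c1 c2 ex univ ha chain queue hq := by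
  fun_induction pvKempeAux with
  | case1 => intro y hy; simp at hy
  | case2 chain x rest hq hx1 _ ih =>
    intro y hy hyq
    rcases List.mem_cons.mp hy with rfl | hyr
    · rcases hx1 with h | rfl
      · exact kempe_mono adjD colorD c1 c2 ex univ ha chain rest _ y h
      · exact absurd rfl hyq.1
    · exact ih y hyr hyq
  | case3 chain x rest hq hx1 hx2 _ ih =>
    intro y hy hyq
    rcases List.mem_cons.mp hy with rfl | hyr
    · exact absurd hyq.2 hx2
    · exact ih y hyr hyq
  | case4 chain x rest hq hx1 hx2 _ ih =>
    intro y hy hyq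
    rcases List.mem_cons.mp hy with rfl | hyr
    · exact kempe_mono adjD colorD c1 c2 ex univ ha _ _ _ y
        ((PySem.Set.mem_add chain y y).mpr (Or.inr rfl))
    · exact ih y (List.mem_append.mpr (Or.inl hyr)) hyq

theorem kempe_sound (adjD : PySem.Dict Int (List Int)) (colorD : PySem.Dict Int Int)
    (c1 c2 ex start : Int) (univ : List Int) (ha : ∀ x ∈ adjD.values.flatten, x ∈ univ)
    (chain : PySem.Set Int) (queue : List Int) (hq : ∀ x ∈ queue, x ∈ univ)
    (hc : ∀ y ∈ chain, pvReach adjD colorD c1 c2 ex start y)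
    (hqr : ∀ y ∈ queue, pvQual colorD c1 c2 ex y → pvReach adjD colorD c1 c2 ex start y) :
    ∀ y ∈ pvKempeAux adjD colorD c1 c2 ex univ ha chain queue hq,
      pvReach adjD colorD c1 c2 ex start y := by
  revert hc hqr
  fun_induction pvKempeAux with
  | case1 => intro hc _ y hy; exact hc y hy
  | case2 chain x rest hq hx1 _ ih =>
    intro hc hqr
    exact ih hc (fun y hy hyq => hqr y (List.mem_cons_of_mem _ hy) hyq)
  | case3 chain x rest hq hx1 hx2 _ ih =>
    intro hc hqr
    exact ih hc (fun y hy hyq => hqr y (List.mem_cons_of_mem _ hy) hyq)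
  | case4 chain x rest hq hx1 hx2 _ ih =>
    intro hc hqr
    have hqx : pvQual colorD c1 c2 ex x := ⟨fun h => hx1 (Or.inr h), not_not.mp hx2⟩
    have hrx : pvReach adjD colorD c1 c2 ex start x := hqr x List.mem_cons_self hqx
    apply ih
    · intro y hy
      rcases (PySem.Set.mem_add chain x y).mp hy with h | rfl
      · exact hc y h
      · exact hrx
    · intro y hy hyq
      rcases List.mem_append.mp hy with h | h
      · exact hqr y (List.mem_cons_of_mem _ h) hyq
      · exact ⟨hrx.1, hrx.2.tail ⟨List.mem_of_mem_filter h, hyq⟩⟩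

theorem kempe_closed (adjD : PySem.Dict Int (List Int)) (colorD : PySem.Dict Int Int)
    (c1 c2 ex : Int) (univ : List Int) (ha : ∀ x ∈ adjD.values.flatten, x ∈ univ)
    (chain : PySem.Set Int) (queue : List Int) (hq : ∀ x ∈ queue, x ∈ univ)
    (hcl : ∀ u ∈ chain, ∀ w, pvStep adjD colorD c1 c2 ex u w → w ∈ chain ∨ w ∈ queue) :
    ∀ u ∈ pvKempeAux adjD colorD c1 c2 ex univ ha chain queue hq, ∀ w,
      pvStep adjD colorD c1 c2 ex u w →
      w ∈ pvKempeAux adjD colorD c1 c2 ex univ ha chain queue hq := by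
  revert hcl
  fun_induction pvKempeAux with
  | case1 =>
    intro hcl u hu w hst
    rcases hcl u hu w hst with h | h
    · exact h
    · simp at h
  | case2 chain x rest hq hx1 _ ih =>
    intro hcl
    apply ih
    intro u hu w hst
    rcases hcl u hu w hst with h | h
    · exact Or.inl h
    · rcases List.mem_cons.mp h with rfl | h'
      · rcases hx1 with h2 | rfl
        · exact Or.inl h2
        · exact absurd rfl hst.2.1
      · exact Or.inr h'
  | case3 chain x rest hq hx1 hx2 _ ih =>
    intro hcl
    apply ih
    intro u hu w hst
    rcases hcl u hu w hst with h | h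
    · exact Or.inl h
    · rcases List.mem_cons.mp h with rfl | h'
      · exact absurd hst.2.2 hx2
      · exact Or.inr h'
  | case4 chain x rest hq hx1 hx2 _ ih =>
    intro hcl
    apply ih
    intro u hu w hst
    by_cases hwc : w ∈ chain.add x
    · exact Or.inl hwc
    · rcases (PySem.Set.mem_add chain x u).mp hu with huc | rfl
      · rcases hcl u huc w hst with h | h
        · exact absurd ((PySem.Set.mem_add chain x w).mpr (Or.inl h)) hwc
        · rcases List.mem_cons.mp h with rfl | h'
          · exact absurd ((PySem.Set.mem_add chain w w).mpr (Or.inr rfl)) hwc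
          · exact Or.inr (List.mem_append.mpr (Or.inl h'))
      · refine Or.inr (List.mem_append.mpr (Or.inr ?_))
        refine List.mem_filter.mpr ⟨hst.1, ?_⟩
        have h1 : (w != ex) = true := by simpa using hst.2.1
        have h3 : (colorD.getD w (-1) == c1 || colorD.getD w (-1) == c2) = true := by
          rcases hst.2.2 with h | h <;> simp [h]
        have h4 : w ∉ chain := fun hc => hwc ((PySem.Set.mem_add chain u w).mpr (Or.inl hc))
        have h5 : ¬w = u := fun he => hwc ((PySem.Set.mem_add chain u w).mpr (Or.inr he))
        simp [h1, h3, h4, h5]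

theorem mem_pvKempe (adjD : PySem.Dict Int (List Int)) (colorD : PySem.Dict Int Int)
    (start c1 c2 ex y : Int) :
    y ∈ pvKempe adjD colorD start c1 c2 ex ↔ pvReach adjD colorD c1 c2 ex start y := by
  unfold pvKempe
  constructor
  · intro hy
    refine kempe_sound adjD colorD c1 c2 ex start _ _ _ _ _ ?_ ?_ y hy
    · intro z hz; simp [PySem.Set.empty] at hz
    · intro z hz hzq
      have : z = start := by simpa using hz
      subst this
      exact ⟨hzq, Relation.ReflTransGen.refl⟩
  · rintro ⟨hqs, hrtg⟩
    have hstart : start ∈ pvKempeAux adjD colorD c1 c2 ex (start :: adjD.values.flatten)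
        (fun x hx => List.mem_cons_of_mem _ hx) PySem.Set.empty [start]
        (fun y hy => by simp at hy; simp [hy]) :=
      kempe_queue adjD colorD c1 c2 ex _ _ _ _ _ start (by simp) hqs
    have hclosed := kempe_closed adjD colorD c1 c2 ex (start :: adjD.values.flatten)
        (fun x hx => List.mem_cons_of_mem _ hx) PySem.Set.empty [start]
        (fun y hy => by simp at hy; simp [hy])
        (fun u hu => by simp [PySem.Set.empty] at hu)
    induction hrtg with
    | refl => exact hstart
    | tail hab hbc ihh => exact hclosed _ ihh _ hbc

-- ===== B-side lemmas: Warshall closure = reachability =====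
theorem pvQualB_iff (colorD : PySem.Dict Int Int) (c1 c2 v x : Int) :
    pvQualB colorD c1 c2 v x = true ↔ pvQual colorD c1 c2 v x := by
  simp [pvQualB, pvQual]

-- nonempty paths whose intermediate vertices lie in P
inductive PVThru (adjD : PySem.Dict Int (List Int)) (colorD : PySem.Dict Int Int)
    (c1 c2 v : Int) : List Int → Int → Int → Prop
  | single {P i j} : pvStep adjD colorD c1 c2 v i j → PVThru adjD colorD c1 c2 v P i j
  | cons {P i k j} : pvStep adjD colorD c1 c2 v i k → k ∈ P →
      PVThru adjD colorD c1 c2 v P k j → PVThru adjD colorD c1 c2 v P i j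

theorem thru_mono (adjD : PySem.Dict Int (List Int)) (colorD : PySem.Dict Int Int)
    (c1 c2 v : Int) (P P' : List Int) (hss : ∀ x ∈ P, x ∈ P') (i j : Int)
    (h : PVThru adjD colorD c1 c2 v P i j) : PVThru adjD colorD c1 c2 v P' i j := by
  induction h with
  | single hs => exact .single hs
  | cons hs hk _ ih => exact .cons hs (hss _ hk) ih

theorem thru_congr (adjD : PySem.Dict Int (List Int)) (colorD : PySem.Dict Int Int)
    (c1 c2 v : Int) (P P' : List Int) (hss : ∀ x, x ∈ P ↔ x ∈ P') (i j : Int) :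
    PVThru adjD colorD c1 c2 v P i j ↔ PVThru adjD colorD c1 c2 v P' i j :=
  ⟨thru_mono adjD colorD c1 c2 v P P' (fun x hx => (hss x).mp hx) i j,
   thru_mono adjD colorD c1 c2 v P' P (fun x hx => (hss x).mpr hx) i j⟩

theorem thru_nil_iff (adjD : PySem.Dict Int (List Int)) (colorD : PySem.Dict Int Int)
    (c1 c2 v i j : Int) :
    PVThru adjD colorD c1 c2 v [] i j ↔ pvStep adjD colorD c1 c2 v i j := by
  constructor
  · intro h
    cases h with
    | single hs => exact hs
    | cons _ hk _ => simp at hk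
  · exact .single

theorem thru_glue (adjD : PySem.Dict Int (List Int)) (colorD : PySem.Dict Int Int)
    (c1 c2 v : Int) (P : List Int) (k i j : Int)
    (h1 : PVThru adjD colorD c1 c2 v P i k) (h2 : PVThru adjD colorD c1 c2 v P k j) :
    PVThru adjD colorD c1 c2 v (k :: P) i j := by
  induction h1 with
  | single hs =>
    exact .cons hs List.mem_cons_self
      (thru_mono adjD colorD c1 c2 v P _ (fun x hx => List.mem_cons_of_mem _ hx) _ _ h2)
  | cons hs hm _ ih => exact .cons hs (List.mem_cons_of_mem _ hm) (ih h2)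

theorem thru_cons_iff (adjD : PySem.Dict Int (List Int)) (colorD : PySem.Dict Int Int)
    (c1 c2 v : Int) (P : List Int) (k i j : Int) :
    PVThru adjD colorD c1 c2 v (k :: P) i j ↔
      PVThru adjD colorD c1 c2 v P i j ∨
        (PVThru adjD colorD c1 c2 v P i k ∧ PVThru adjD colorD c1 c2 v P k j) := by
  constructor
  · intro h
    induction h with
    | single hs => exact Or.inl (.single hs)
    | cons hs hm _ ih =>
      rename_i P' i' m j'
      rcases List.mem_cons.mp hm with rfl | hmP
      · rcases ih with h' | ⟨_, h2⟩
        · exact Or.inr ⟨.single hs, h'⟩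
        · exact Or.inr ⟨.single hs, h2⟩
      · rcases ih with h' | ⟨h1, h2⟩
        · exact Or.inl (.cons hs hmP h')
        · exact Or.inr ⟨.cons hs hmP h1, h2⟩
  · intro h
    rcases h with h | ⟨h1, h2⟩
    · exact thru_mono adjD colorD c1 c2 v P _ (fun x hx => List.mem_cons_of_mem _ hx) _ _ h
    · exact thru_glue adjD colorD c1 c2 v P k i j h1 h2

theorem thru_target (adjD : PySem.Dict Int (List Int)) (colorD : PySem.Dict Int Int)
    (c1 c2 v : Int) (P : List Int) (i j : Int)
    (h : PVThru adjD colorD c1 c2 v P i j) :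
    pvQual colorD c1 c2 v j ∧ j ∈ adjD.values.flatten := by
  induction h with
  | single hs => exact ⟨hs.2, pv_getD_mem_values_flatten adjD _ _ hs.1⟩
  | cons _ _ _ ih => exact ih

theorem thru_snoc (adjD : PySem.Dict Int (List Int)) (colorD : PySem.Dict Int Int)
    (c1 c2 v : Int) (P : List Int) (i b c : Int)
    (h : PVThru adjD colorD c1 c2 v P i b) (hs : pvStep adjD colorD c1 c2 v b c)
    (hb : b ∈ P) : PVThru adjD colorD c1 c2 v P i c := by
  revert hs hb
  induction h with
  | single h0 => intro hs hb; exact .cons h0 hb (.single hs)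
  | cons h0 hm _ ih => intro hs hb; exact .cons h0 hm (ih hs hb)

theorem mem_pvNodes (adjD : PySem.Dict Int (List Int)) (colorD : PySem.Dict Int Int)
    (c1 c2 v first x : Int) :
    x ∈ pvNodes adjD colorD c1 c2 v first ↔
      (x = first ∨ x ∈ adjD.values.flatten) ∧ pvQual colorD c1 c2 v x := by
  simp only [pvNodes, PySem.Set.mem_ofList, List.mem_filter, List.mem_cons,
    pvQualB_iff]

theorem pv_getD_foldl_insert_of_not_mem (L : List Int)
    (f : Int → PySem.Set Int) (i : Int) :
    ∀ (d : PySem.Dict Int (PySem.Set Int)), i ∉ L →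
      (L.foldl (fun d u => d.insert u (f u)) d).getD i PySem.Set.empty =
        d.getD i PySem.Set.empty := by
  induction L with
  | nil => intro d _; rfl
  | cons a t ih =>
    intro d hi
    simp only [List.foldl_cons]
    rw [ih _ (fun h => hi (List.mem_cons_of_mem _ h)), PySem.Dict.getD_insert]
    rw [if_neg (fun h => hi (by rw [h]; exact List.mem_cons_self))]

theorem pv_getD_foldl_insert_self (L : List Int)
    (f : Int → PySem.Set Int) (i : Int) :
    ∀ (d : PySem.Dict Int (PySem.Set Int)), i ∈ L → L.Nodup →
      (L.foldl (fun d u => d.insert u (f u)) d).getD i PySem.Set.empty = f i := by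
  induction L with
  | nil => intro d hi _; simp at hi
  | cons a t ih =>
    intro d hi hnd
    simp only [List.foldl_cons]
    rcases List.mem_cons.mp hi with rfl | hit
    · rw [pv_getD_foldl_insert_of_not_mem t f i _ (List.Nodup.notMem hnd),
        PySem.Dict.getD_insert, if_pos rfl]
    · exact ih _ hit (List.Nodup.of_cons hnd)

theorem pv_reach0_mem (adjD : PySem.Dict Int (List Int)) (colorD : PySem.Dict Int Int)
    (c1 c2 v first i j : Int) (hi : i ∈ pvNodes adjD colorD c1 c2 v first) :
    j ∈ (pvReach0 adjD colorD c1 c2 v first).getD i PySem.Set.empty ↔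
      pvStep adjD colorD c1 c2 v i j := by
  unfold pvReach0
  rw [pv_getD_foldl_insert_self _ _ i _ hi (PySem.Set.nodup_ofList _)]
  simp only [PySem.Set.mem_ofList, List.mem_filter, pvQualB_iff]
  exact Iff.rfl

-- one Warshall round preserves the closure invariant
theorem pv_round_inv (adjD : PySem.Dict Int (List Int)) (colorD : PySem.Dict Int Int)
    (c1 c2 v : Int) (nodes : List Int) (P : List Int) (k : Int)
    (L : List Int) (hLsub : ∀ x ∈ L, x ∈ nodes) (hLnd : L.Nodup)
    (r : PySem.Dict Int (PySem.Set Int))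
    (hk : ∀ j, j ∈ r.getD k PySem.Set.empty ↔ PVThru adjD colorD c1 c2 v P k j)
    (hunproc : ∀ i ∈ L, ∀ j, j ∈ r.getD i PySem.Set.empty ↔
      PVThru adjD colorD c1 c2 v P i j)
    (hproc : ∀ i ∈ nodes, i ∉ L → ∀ j, j ∈ r.getD i PySem.Set.empty ↔
      PVThru adjD colorD c1 c2 v (k :: P) i j) :
    ∀ i ∈ nodes, ∀ j, j ∈ (L.foldl (pvRoundStep k) r).getD i PySem.Set.empty ↔
      PVThru adjD colorD c1 c2 v (k :: P) i j := by
  induction L generalizing r with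
  | nil =>
    intro i hi j
    exact hproc i hi (by simp) j
  | cons a t ih =>
    simp only [List.foldl_cons]
    have ha_un := hunproc a List.mem_cons_self
    have hant : a ∉ t := List.Nodup.notMem hLnd
    have hr1getD : ∀ i, i ≠ a →
        (pvRoundStep k r a).getD i PySem.Set.empty = r.getD i PySem.Set.empty := by
      intro i hia
      unfold pvRoundStep
      split
      · rw [PySem.Dict.getD_insert, if_neg hia]
      · rfl
    have hr1a : ∀ j, j ∈ (pvRoundStep k r a).getD a PySem.Set.empty ↔
        PVThru adjD colorD c1 c2 v (k :: P) a j := by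
      intro j
      unfold pvRoundStep
      by_cases hcond : (r.getD a PySem.Set.empty).contains k = true
      · rw [if_pos hcond, PySem.Dict.getD_insert, if_pos rfl]
        have hak : PVThru adjD colorD c1 c2 v P a k :=
          (ha_un k).mp ((PySem.Set.contains_iff _ _).mp hcond)
        rw [PySem.Set.mem_union, thru_cons_iff]
        rw [ha_un j, hk j]
        constructor
        · rintro (h | h)
          · exact Or.inl h
          · exact Or.inr ⟨hak, h⟩
        · rintro (h | ⟨_, h⟩)
          · exact Or.inl h
          · exact Or.inr h
      · rw [if_neg hcond]
        have hnak : ¬ PVThru adjD colorD c1 c2 v P a k := by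
          intro h
          exact hcond ((PySem.Set.contains_iff _ _).mpr ((ha_un k).mpr h))
        rw [ha_un j, thru_cons_iff]
        constructor
        · exact Or.inl
        · rintro (h | ⟨h1, _⟩)
          · exact h
          · exact absurd h1 hnak
    apply ih (fun x hx => hLsub x (List.mem_cons_of_mem _ hx)) (List.Nodup.of_cons hLnd)
    · -- reach[k] membership unchanged
      intro j
      by_cases hak : a = k
      · subst hak
        unfold pvRoundStep
        split
        · rw [PySem.Dict.getD_insert, if_pos rfl, PySem.Set.mem_union]
          rw [hk j]
          tauto
        · exact hk j
      · rw [hr1getD k (fun h => hak h.symm)]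
        exact hk j
    · intro i hit j
      rw [hr1getD i (fun h => hant (h ▸ hit))]
      exact hunproc i (List.mem_cons_of_mem _ hit) j
    · intro i hi hint j
      by_cases hia : i = a
      · subst hia
        exact hr1a j
      · rw [hr1getD i hia]
        exact hproc i hi (by
          intro h
          rcases List.mem_cons.mp h with h' | h'
          · exact hia h'
          · exact hint h') j

theorem pv_warshall_inv (adjD : PySem.Dict Int (List Int)) (colorD : PySem.Dict Int Int)
    (c1 c2 v : Int) (nodes : List Int) (hnd : nodes.Nodup)
    (K : List Int) (hK : ∀ x ∈ K, x ∈ nodes) (P : List Int)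
    (r : PySem.Dict Int (PySem.Set Int))
    (hr : ∀ i ∈ nodes, ∀ j, j ∈ r.getD i PySem.Set.empty ↔
      PVThru adjD colorD c1 c2 v P i j) :
    ∀ i ∈ nodes, ∀ j, j ∈ (K.foldl (pvRound nodes) r).getD i PySem.Set.empty ↔
      PVThru adjD colorD c1 c2 v (K ++ P) i j := by
  induction K generalizing P r with
  | nil => simpa using hr
  | cons k K' ih =>
    simp only [List.foldl_cons]
    have h1 : ∀ i ∈ nodes, ∀ j, j ∈ (pvRound nodes r k).getD i PySem.Set.empty ↔
        PVThru adjD colorD c1 c2 v (k :: P) i j := by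
      unfold pvRound
      exact pv_round_inv adjD colorD c1 c2 v nodes P k nodes (fun x hx => hx) hnd r
        (hr k (hK k List.mem_cons_self))
        (fun i hi => hr i hi)
        (fun i hi hc => absurd hi hc)
    intro i hi j
    rw [ih (fun x hx => hK x (List.mem_cons_of_mem _ hx)) (k :: P) _ h1 i hi j]
    exact thru_congr adjD colorD c1 c2 v _ _ (by intro x; simp; tauto) i j

theorem thru_nodes_iff_transGen (adjD : PySem.Dict Int (List Int))
    (colorD : PySem.Dict Int Int) (c1 c2 v first i j : Int) :
    PVThru adjD colorD c1 c2 v (pvNodes adjD colorD c1 c2 v first) i j ↔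
      Relation.TransGen (pvStep adjD colorD c1 c2 v) i j := by
  constructor
  · intro h
    induction h with
    | single hs => exact Relation.TransGen.single hs
    | cons hs _ _ ih => exact Relation.TransGen.head hs ih
  · intro h
    induction h with
    | single hs => exact .single hs
    | tail _ hs ih =>
      rename_i b c _
      have hb := thru_target adjD colorD c1 c2 v _ i b ih
      exact thru_snoc adjD colorD c1 c2 v _ i b c ih hs
        ((mem_pvNodes adjD colorD c1 c2 v first b).mpr ⟨Or.inr hb.2, hb.1⟩)

theorem mem_pvReachF (adjD : PySem.Dict Int (List Int)) (colorD : PySem.Dict Int Int)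
    (c1 c2 v first j : Int) (hfq : pvQual colorD c1 c2 v first) :
    j ∈ (pvReachF adjD colorD c1 c2 v first).getD first PySem.Set.empty ↔
      Relation.TransGen (pvStep adjD colorD c1 c2 v) first j := by
  have hfirst : first ∈ pvNodes adjD colorD c1 c2 v first :=
    (mem_pvNodes adjD colorD c1 c2 v first first).mpr ⟨Or.inl rfl, hfq⟩
  have hnd : (pvNodes adjD colorD c1 c2 v first).Nodup := PySem.Set.nodup_ofList _
  unfold pvReachF
  rw [pv_warshall_inv adjD colorD c1 c2 v _ hnd _ (fun x hx => hx) []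
    (pvReach0 adjD colorD c1 c2 v first)
    (fun i hi j => by
      rw [pv_reach0_mem adjD colorD c1 c2 v first i j hi, thru_nil_iff])
    first hfirst j]
  rw [thru_congr adjD colorD c1 c2 v (pvNodes adjD colorD c1 c2 v first ++ [])
    (pvNodes adjD colorD c1 c2 v first) (by intro x; simp) first j]
  exact thru_nodes_iff_transGen adjD colorD c1 c2 v first first j

-- the per-pair tangle tests of the two ports compute the same Boolean
theorem pv_cond_eq (adjD : PySem.Dict Int (List Int)) (colorD : PySem.Dict Int Int)
    (v c1 c2 : Int) (relevant : List Int) (hne : relevant ≠ []) :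
    relevant.all (fun u => PySem.Set.contains
        (pvKempe adjD colorD (PySem.List.pyGetD relevant 0 0) c1 c2 v) u)
    = (pvQualB colorD c1 c2 v (PySem.List.pyGetD relevant 0 0) &&
        relevant.all (fun u => u == PySem.List.pyGetD relevant 0 0 ||
          ((pvReachF adjD colorD c1 c2 v (PySem.List.pyGetD relevant 0 0)).getD
            (PySem.List.pyGetD relevant 0 0) PySem.Set.empty).contains u)) := by
  set first := PySem.List.pyGetD relevant 0 0 with hfirst
  by_cases hq : pvQual colorD c1 c2 v first
  · apply Bool.eq_iff_iff.mpr
    rw [Bool.and_eq_true, List.all_eq_true, List.all_eq_true]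
    constructor
    · intro hall
      refine ⟨(pvQualB_iff colorD c1 c2 v first).mpr hq, ?_⟩
      intro u hu
      have := (PySem.Set.contains_iff _ _).mp (hall u hu)
      have hr := (mem_pvKempe adjD colorD first c1 c2 v u).mp this
      rcases (Relation.reflTransGen_iff_eq_or_transGen).mp hr.2 with rfl | htg
      · simp
      · simp only [Bool.or_eq_true, beq_iff_eq]
        exact Or.inr ((PySem.Set.contains_iff _ _).mpr
          ((mem_pvReachF adjD colorD c1 c2 v first u hq).mpr htg))
    · rintro ⟨_, hall⟩
      intro u hu
      apply (PySem.Set.contains_iff _ _).mpr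
      apply (mem_pvKempe adjD colorD first c1 c2 v u).mpr
      refine ⟨hq, ?_⟩
      rcases Bool.or_eq_true _ _ |>.mp (hall u hu) with h | h
      · have : u = first := by simpa using h
        subst this
        exact Relation.ReflTransGen.refl
      · exact Relation.reflTransGen_iff_eq_or_transGen.mpr
          (Or.inr ((mem_pvReachF adjD colorD c1 c2 v first u hq).mp
            ((PySem.Set.contains_iff _ _).mp h)))
  · have hqb : pvQualB colorD c1 c2 v first = false := by
      rw [← Bool.not_eq_true, pvQualB_iff]; exact hq
    rw [hqb, Bool.false_and]
    apply Bool.eq_false_iff.mpr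
    intro hall
    obtain ⟨u0, hu0⟩ := List.exists_mem_of_ne_nil relevant hne
    have := (PySem.Set.contains_iff _ _).mp (List.all_eq_true.mp hall u0 hu0)
    exact hq ((mem_pvKempe adjD colorD first c1 c2 v u0).mp this).1

theorem pv_branch_eq (adjD : PySem.Dict Int (List Int)) (colorD : PySem.Dict Int Int)
    (v c1 c2 : Int) (relevant : List Int) (acc : Int × (List (Int × Int))) :
    (if relevant.length < 2 then acc
     else if relevant.all (fun u => PySem.Set.contains
         (pvKempe adjD colorD (PySem.List.pyGetD relevant 0 0) c1 c2 v) u) then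
       (acc.1 + 1, acc.2 ++ [(c1, c2)])
     else acc)
    =
    (if relevant.length < 2 then acc
     else if pvQualB colorD c1 c2 v (PySem.List.pyGetD relevant 0 0) &&
        relevant.all (fun u => u == PySem.List.pyGetD relevant 0 0 ||
          ((pvReachF adjD colorD c1 c2 v (PySem.List.pyGetD relevant 0 0)).getD
            (PySem.List.pyGetD relevant 0 0) PySem.Set.empty).contains u) then
       (acc.1 + 1, acc.2 ++ [(c1, c2)])
     else acc) := by
  by_cases hlen : relevant.length < 2
  · rw [if_pos hlen, if_pos hlen]
  · rw [if_neg hlen, if_neg hlen]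
    have hne : relevant ≠ [] := by
      intro h
      subst h
      simp at hlen
    rw [pv_cond_eq adjD colorD v c1 c2 relevant hne]

-- ===== VERDICT (by name: the statement is the Claim_ definition above) =====
theorem compute_tau_spec : Claim_equal_compute_tau := by
  intro adj color v _ _
  unfold Spec_compute_tau compute_tau compute_tau_alt
  dsimp only
  refine PySem.List.foldl_congr_mem _ _ _ _ ?_
  intro acc pr hpr
  have hlen : pr.length = 2 := PySem.List.length_of_mem_combinations hpr
  cases pr with
  | nil => simp at hlen
  | cons c1 t =>
    cases t with
    | nil => simp at hlen
    | cons c2 t2 =>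
      cases t2 with
      | cons a b => simp at hlen
      | nil =>
        exact pv_branch_eq _ _ v c1 c2 _ acc
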